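-- pv_equiv track=rewrite | github.com/timbob04/DailyWordDefinition | addEditWords/addEditWords_functionsClasses.py | softHypenLongWords
-- ===== SOURCE A (Python) =====
-- def softHypenLongWords(text, max_word_length=15):
--     # Add hyphens to long words which are only used if the word needs to be wrapped
--     words = text.split()  # Split text by spaces
--     wrapped_words = []
--     for word in words:
--         if len(word) > max_word_length:
--             # Insert soft hyphens at every max_word_length characters for long words
--             wrapped_word = '\u00AD'.join([word[i:i+max_word_length] for i in range(0, len(word), max_word_length)])
--             wrapped_words.append(wrapped_word)
--         else:
--             wrapped_words.append(word)
--     # Join words back with spaces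
--     return ' '.join(wrapped_words)
-- ===== SOURCE B (Python) =====
-- def softHypenLongWords(text, max_word_length=15):
--     # Recursively peel chunks of max_word_length off the front of each long word;
--     # a non-positive limit disables hyphenation.
--     if max_word_length <= 0:
--         return ' '.join(text.split())
--     return ' '.join(_hyphenate(w, max_word_length) for w in text.split())
--
--
-- def _hyphenate(word, m):
--     if len(word) <= m:
--         return word
--     return word[:m] + '\u00AD' + _hyphenate(word[m:], m)
-- ===== Notes on version B (the rewrite author's own statement) =====
-- stated objective: simpler
-- what changed: Replaces A's index-arithmetic slice comprehension over range(0, len, m) joined per word with a short recursion that peels one chunk off the front of the word; non-positive limits leave words intact instead of reproducing A's word-erasing slice quirk.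
-- intended difference: For negative max_word_length on text containing at least one word, A's range slicing yields no chunks so it replaces every word with the empty string and returns only the separating spaces, while B returns the words unchanged, which is the intended behaviour when the limit is not a positive length. — e.g. on softHypenLongWords("abc de", -2): A returns " ", B returns "abc de"
import Mathlib
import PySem

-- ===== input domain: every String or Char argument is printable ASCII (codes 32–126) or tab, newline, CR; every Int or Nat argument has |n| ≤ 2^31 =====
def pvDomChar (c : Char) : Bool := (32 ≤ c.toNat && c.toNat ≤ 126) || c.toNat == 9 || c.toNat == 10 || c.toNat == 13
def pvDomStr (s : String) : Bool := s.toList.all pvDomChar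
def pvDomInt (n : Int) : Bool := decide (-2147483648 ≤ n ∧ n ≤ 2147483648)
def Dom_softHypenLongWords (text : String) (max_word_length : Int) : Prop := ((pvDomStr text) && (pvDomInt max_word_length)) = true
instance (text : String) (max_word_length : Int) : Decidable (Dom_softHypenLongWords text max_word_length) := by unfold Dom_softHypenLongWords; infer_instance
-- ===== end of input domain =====

-- B replaces A's index-range slice comprehension by a recursion that peels one chunk off
-- the front of each long word (objective: simpler); for negative limits B intentionally
-- leaves words unchanged where A erases them (see D_ below).

-- ===== PORT A =====
-- '\u00AD' (soft hyphen), the join separator inside a long word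
def pvSoftHyphen : List Char := [Char.ofNat 173]

def softHypenLongWords (text : String) (max_word_length : Int) : String :=
  let words := PySem.Chars.split₀ text.toList
  let wrapped_words := words.map (fun word =>
    if max_word_length < (word.length : Int) then
      PySem.Chars.join pvSoftHyphen
        ((PySem.List.pyRange 0 (word.length : Int) max_word_length).map
          (fun i => PySem.List.slice word (some i) (some (i + max_word_length))))
    else word)
  String.ofList (PySem.Chars.join [' '] wrapped_words)

-- ===== PORT B =====
-- recursive front-chunk peeling of Source B's _hyphenate; fuel = word.length makes the
-- structural recursion total (it is never exhausted when 0 < m, the only way B calls it)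
def pvHyphenate (m : Int) : Nat → List Char → List Char
  | 0, word => word
  | fuel + 1, word =>
    if (word.length : Int) ≤ m then word
    else
      PySem.List.slice word none (some m) ++ pvSoftHyphen
        ++ pvHyphenate m fuel (PySem.List.slice word (some m) none)

def softHypenLongWords_alt (text : String) (max_word_length : Int) : String :=
  let words := PySem.Chars.split₀ text.toList
  if max_word_length ≤ 0 then
    String.ofList (PySem.Chars.join [' '] words)
  else
    String.ofList (PySem.Chars.join [' ']
      (words.map (fun w => pvHyphenate max_word_length w.length w)))

-- ===== PRECONDITION & SPEC =====
-- Pre_ excludes exactly the inputs where A raises: max_word_length = 0 with at least one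
-- word in the text (range() step 0 → ValueError); everywhere else A returns.
def Pre_softHypenLongWords (text : String) (max_word_length : Int) : Prop :=
  max_word_length ≠ 0 ∨ PySem.Chars.split₀ text.toList = []

instance (text : String) (max_word_length : Int) : Decidable (Pre_softHypenLongWords text max_word_length) := by
  unfold Pre_softHypenLongWords; infer_instance

def pvWitness_softHypenLongWords : String × Int := ("hello wonderful world", 4)

-- For negative max_word_length on text containing at least one word, A's range slicing
-- yields no chunks, so A replaces every word with the empty string and returns only the
-- separating spaces; B returns the words unchanged, which is the intended behaviour when the limit is not a positive length.
def D_softHypenLongWords (text : String) (max_word_length : Int) : Prop :=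
  max_word_length < 0 ∧ PySem.Chars.split₀ text.toList ≠ []

instance (text : String) (max_word_length : Int) : Decidable (D_softHypenLongWords text max_word_length) := by
  unfold D_softHypenLongWords; infer_instance

def Spec_softHypenLongWords (text : String) (max_word_length : Int) (out : String) : Prop :=
  ¬ D_softHypenLongWords text max_word_length → out = softHypenLongWords_alt text max_word_length

instance (text : String) (max_word_length : Int) (out : String) : Decidable (Spec_softHypenLongWords text max_word_length out) := by
  unfold Spec_softHypenLongWords; infer_instance

def pvDiffWitness_softHypenLongWords : String × Int := ("abc de", -2)
def pvDiffWitnessOut_softHypenLongWords : String × String := (" ", "abc de")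

-- ===== CLAIM (what is proved, stated in full; the proofs are below) =====
def Claim_unchanged_softHypenLongWords : Prop := ∀ (text : String) (max_word_length : Int), Dom_softHypenLongWords text max_word_length → Pre_softHypenLongWords text max_word_length → Spec_softHypenLongWords text max_word_length (softHypenLongWords text max_word_length)

def Claim_changed_softHypenLongWords : Prop := Dom_softHypenLongWords (pvDiffWitness_softHypenLongWords.1) (pvDiffWitness_softHypenLongWords.2) ∧ Pre_softHypenLongWords (pvDiffWitness_softHypenLongWords.1) (pvDiffWitness_softHypenLongWords.2) ∧ D_softHypenLongWords (pvDiffWitness_softHypenLongWords.1) (pvDiffWitness_softHypenLongWords.2) ∧ softHypenLongWords (pvDiffWitness_softHypenLongWords.1) (pvDiffWitness_softHypenLongWords.2) = pvDiffWitnessOut_softHypenLongWords.1 ∧ softHypenLongWords_alt (pvDiffWitness_softHypenLongWords.1) (pvDiffWitness_softHypenLongWords.2) = pvDiffWitnessOut_softHypenLongWords.2 ∧ pvDiffWitnessOut_softHypenLongWords.1 ≠ pvDiffWitnessOut_softHypenLongWords.2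

def Claim_exact_softHypenLongWords : Prop := ∀ (text : String) (max_word_length : Int), Dom_softHypenLongWords text max_word_length → Pre_softHypenLongWords text max_word_length → D_softHypenLongWords text max_word_length → softHypenLongWords text max_word_length ≠ softHypenLongWords_alt text max_word_length


-- ===== LEMMAS AND PROOFS =====

-- range(0, n, s) is empty for a negative step and 0 ≤ n
theorem pvPyRange_neg_nil (n s : Int) (hn : 0 ≤ n) (hs : s < 0) :
    PySem.List.pyRange 0 n s = [] := by
  simp only [PySem.List.pyRange]
  rw [if_neg (by omega)]
  rw [if_neg (by omega), if_neg (by omega)]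
  simp

-- A's chunk list for a positive step, in Nat form
def pvChunks (m : Nat) (w : List Char) : List (List Char) :=
  (PySem.List.pyRange 0 (w.length : Int) (m : Int)).map
    (fun i => PySem.List.slice w (some i) (some (i + (m : Int))))

theorem pvChunks_nil (m : Nat) : pvChunks m [] = [] := by
  simp [pvChunks, PySem.List.pyRange]

theorem pvChunks_short (m : Nat) (w : List Char) (hm : 0 < m) (hw : w ≠ [])
    (hle : w.length ≤ m) : pvChunks m w = [w] := by
  have hn : 0 < w.length := List.length_pos_iff.mpr hw
  unfold pvChunks
  rw [PySem.List.pyRange_of_pos 0 (w.length : Int) (by exact_mod_cast hm)]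
  rw [if_pos (by exact_mod_cast hn)]
  have hcnt : (((w.length : Int) - 0 + (m : Int) - 1) / (m : Int)) = 1 := by
    have := Int.ediv_emod_unique (a := (w.length : Int) - 0 + (m : Int) - 1) (b := (m : Int))
      (r := (w.length : Int) - 0 + (m : Int) - 1 - (m : Int)) (q := 1)
    omega
  rw [hcnt]
  simp only [Int.toNat_one, List.range_one, List.map_cons, List.map_nil]
  norm_num
  exact hle

theorem pvChunk_elt (m j : Nat) (w : List Char) :
    PySem.List.slice w (some (0 + (m:Int)*(j:Int))) (some (0 + (m:Int)*(j:Int) + (m:Int)))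
      = (w.drop (m*j)).take m := by
  have h : (0 + (m:Int)*(j:Int)) = ((m*j : Nat) : Int) := by push_cast; ring
  rw [h, PySem.List.slice_natCast_add w (m*j) m]

theorem pvChunks_cons (m : Nat) (w : List Char) (hm : 0 < m) (hlt : m < w.length) :
    pvChunks m w = w.take m :: pvChunks m (w.drop m) := by
  have hm' : (0:Int) < (m:Int) := by exact_mod_cast hm
  unfold pvChunks
  rw [PySem.List.pyRange_of_pos 0 (w.length : Int) hm',
      PySem.List.pyRange_of_pos 0 ((w.drop m).length : Int) hm']
  rw [if_pos (by exact_mod_cast (by omega : 0 < w.length)),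
      if_pos (by simp; omega)]
  have hlen : (w.drop m).length = w.length - m := by simp
  have hcnt : (((w.length:Int) - 0 + m - 1)/m).toNat
      = ((((w.drop m).length:Int) - 0 + m - 1)/m).toNat + 1 := by
    rw [hlen]
    have h1 : ((w.length:Int) - 0 + m - 1) = ((w.length:Int) - 1) + 1*(m:Int) := by ring
    have h2 : (((w.length - m : Nat):Int) - 0 + m - 1) = ((w.length:Int) - 1) := by
      push_cast [Nat.cast_sub (le_of_lt hlt)]; ring
    rw [h1, h2, Int.add_mul_ediv_right _ _ (by omega : (m:Int) ≠ 0)]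
    have hdiv : (0:Int) ≤ ((w.length:Int) - 1)/(m:Int) :=
      Int.ediv_nonneg (by omega) (by omega)
    omega
  rw [hcnt, List.range_succ_eq_map]
  simp only [List.map_cons, List.map_map]
  congr 1
  · simp
  · apply List.map_congr_left
    intro k _
    simp only [Function.comp, Nat.succ_eq_add_one]
    have h1 := pvChunk_elt m (k+1) w
    have h2 := pvChunk_elt m k (w.drop m)
    push_cast at h1 h2 ⊢
    rw [h1, h2, List.drop_drop]
    have hk : m * (k + 1) = m + m * k := by ring
    rw [hk]

theorem pvChunks_ne_nil (m : Nat) (w : List Char) (hm : 0 < m) (hw : w ≠ []) :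
    pvChunks m w ≠ [] := by
  by_cases h : w.length ≤ m
  · rw [pvChunks_short m w hm hw h]; simp
  · rw [pvChunks_cons m w hm (by omega)]; simp

-- Source B's recursive peeling computes exactly A's soft-hyphen join of the chunks
theorem pvHyphenate_eq_join (m : Nat) (hm : 0 < m) :
    ∀ (fuel : Nat) (w : List Char), w.length ≤ fuel →
      pvHyphenate (m : Int) fuel w = PySem.Chars.join pvSoftHyphen (pvChunks m w) := by
  intro fuel
  induction fuel with
  | zero =>
    intro w hw
    have : w = [] := List.eq_nil_of_length_eq_zero (by omega)
    subst this
    simp [pvHyphenate, pvChunks_nil, PySem.Chars.join_nil]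
  | succ f ih =>
    intro w hw
    by_cases hle : w.length ≤ m
    · rcases eq_or_ne w [] with rfl | hne
      · simp [pvHyphenate, pvChunks_nil, PySem.Chars.join_nil]
      · rw [pvChunks_short m w hm hne hle, PySem.Chars.join_singleton]
        simp only [pvHyphenate]
        rw [if_pos (by exact_mod_cast hle)]
    · have hlt : m < w.length := by omega
      simp only [pvHyphenate]
      rw [if_neg (by omega)]
      rw [PySem.List.slice_to w (by positivity : (0:Int) ≤ (m:Int)),
          PySem.List.slice_from w (by positivity : (0:Int) ≤ (m:Int))]
      simp only [Int.toNat_natCast]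
      have hdne : w.drop m ≠ [] := by
        intro h
        have := congrArg List.length h
        simp at this
        omega
      rw [ih (w.drop m) (by simp; omega)]
      rw [pvChunks_cons m w hm hlt]
      rcases hc : pvChunks m (w.drop m) with _ | ⟨c, cs⟩
      · exact absurd hc (pvChunks_ne_nil m (w.drop m) hm hdne)
      · rw [PySem.Chars.join_cons_cons]

-- A's per-word value equals B's per-word value for a positive limit
theorem pvWord_eq (m : Nat) (hm : 0 < m) (w : List Char) :
    (if ((m : Int)) < (w.length : Int) then
        PySem.Chars.join pvSoftHyphen
          ((PySem.List.pyRange 0 (w.length : Int) (m : Int)).map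
            (fun i => PySem.List.slice w (some i) (some (i + (m : Int)))))
      else w)
      = pvHyphenate (m : Int) w.length w := by
  by_cases hlt : m < w.length
  · rw [if_pos (by exact_mod_cast hlt)]
    rw [pvHyphenate_eq_join m hm w.length w le_rfl]
    rfl
  · rw [if_neg (by exact_mod_cast hlt)]
    rcases hw : w.length with _ | k
    · simp [pvHyphenate]
    · simp only [pvHyphenate]
      rw [if_pos (by rw [hw]; exact_mod_cast by omega)]

-- every word produced by str.split() is nonempty
theorem pvSplit₀_go_ne_nil : ∀ (s cur : List Char) (acc : List (List Char)),
    (∀ a ∈ acc, a ≠ []) → ∀ w ∈ PySem.Chars.split₀.go s cur acc, w ≠ [] := by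
  intro s
  induction s with
  | nil =>
    intro cur acc hacc w hw
    simp only [PySem.Chars.split₀.go] at hw
    split at hw
    · exact hacc w (List.mem_reverse.mp hw)
    next hcur =>
      rw [List.mem_reverse, List.mem_cons] at hw
      rcases hw with rfl | h
      · simp only [ne_eq, List.reverse_eq_nil_iff]
        simpa [List.isEmpty_iff] using hcur
      · exact hacc w h
  | cons c rest ih =>
    intro cur acc hacc w hw
    simp only [PySem.Chars.split₀.go] at hw
    split at hw
    · split at hw
      · exact ih [] acc hacc w hw
      next hcur =>
        refine ih [] (cur.reverse :: acc) ?_ w hw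
        intro a ha
        rcases List.mem_cons.mp ha with rfl | ha
        · simp only [ne_eq, List.reverse_eq_nil_iff]
          simpa [List.isEmpty_iff] using hcur
        · exact hacc a ha
    · exact ih (c :: cur) acc hacc w hw

theorem pvSplit₀_ne_nil (s : List Char) : ∀ w ∈ PySem.Chars.split₀ s, w ≠ [] := by
  intro w hw
  exact pvSplit₀_go_ne_nil s [] [] (by simp) w hw

-- length of a single-space join
theorem pvJoin_space_length (L : List (List Char)) :
    (PySem.Chars.join [' '] L).length = (L.map List.length).sum + (L.length - 1) := by
  induction L with
  | nil => simp [PySem.Chars.join_nil]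
  | cons p rest ih =>
    rcases rest with _ | ⟨q, rest'⟩
    · simp [PySem.Chars.join_singleton]
    · rw [PySem.Chars.join_cons_cons]
      rw [List.length_append, List.length_append, ih]
      simp
      omega

-- ===== VERDICT (by name: the statement is the Claim_ definition above) =====
theorem softHypenLongWords_spec : Claim_unchanged_softHypenLongWords := by
  intro text m _ hpre hnd
  unfold softHypenLongWords softHypenLongWords_alt
  by_cases hm : 0 < m
  · rw [if_neg (by omega)]
    dsimp only
    congr 1
    apply congrArg
    apply List.map_congr_left
    intro w _
    have hmn : m = ((m.toNat : Nat) : Int) := by omega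
    rw [hmn]
    exact pvWord_eq m.toNat (by omega) w
  · have hwords : PySem.Chars.split₀ text.toList = [] := by
      rcases lt_or_eq_of_le (by omega : m ≤ 0) with hlt | heq
      · by_contra hne
        exact (by intro h; exact hnd h : ¬ D_softHypenLongWords text m) ⟨hlt, hne⟩
      · rcases hpre with h | h
        · exact absurd heq h
        · exact h
    rw [hwords, if_pos (by omega)]
    simp [PySem.Chars.join_nil]

theorem softHypenLongWords_changed : Claim_changed_softHypenLongWords := by
  unfold Claim_changed_softHypenLongWords; decide

theorem softHypenLongWords_tight : Claim_exact_softHypenLongWords := by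
  intro text m _ _ hd heq
  rcases hd with ⟨hneg, hwords⟩
  unfold softHypenLongWords softHypenLongWords_alt at heq
  rw [if_pos (by omega)] at heq
  have heq' := String.ofList_inj.mp heq
  have hmap : (PySem.Chars.split₀ text.toList).map (fun word =>
      if m < (word.length : Int) then
        PySem.Chars.join pvSoftHyphen
          ((PySem.List.pyRange 0 (word.length : Int) m).map
            (fun i => PySem.List.slice word (some i) (some (i + m))))
      else word)
      = (PySem.Chars.split₀ text.toList).map (fun _ => ([] : List Char)) := by
    apply List.map_congr_left
    intro w _
    rw [if_pos (by omega)]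
    rw [pvPyRange_neg_nil (w.length : Int) m (by positivity) hneg]
    simp [PySem.Chars.join_nil]
  rw [hmap] at heq'
  have hlen := congrArg List.length heq'
  rw [pvJoin_space_length, pvJoin_space_length] at hlen
  rcases hw : PySem.Chars.split₀ text.toList with _ | ⟨w0, ws⟩
  · exact hwords hw
  · have hw0 : w0 ≠ [] := pvSplit₀_ne_nil text.toList w0 (by rw [hw]; exact List.mem_cons_self)
    have hw0len : 0 < w0.length := List.length_pos_iff.mpr hw0
    rw [hw] at hlen
    simp at hlen
    exact hw0 hlen.1
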